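-- pv_equiv track=rewrite | github.com/felix-quark/aoc-2021 | day-3/part_two.py | get_co2_rating
-- ===== SOURCE A (Python) =====
-- def get_co2_rating(data: list) -> int:
--     crit_nums = data
--     pos = 0
--
--     while len(crit_nums) > 1:
--         pos_sum_0 = sum(x[pos] == '0' for x in crit_nums)
--         pos_sum_1 = len(crit_nums) - pos_sum_0
--
--         if pos_sum_0 > pos_sum_1:
--             crit_nums = [i for i in crit_nums if i[pos] == '1']
--         else:
--             crit_nums = [i for i in crit_nums if i[pos] == '0']
--
--         pos += 1
--
--     co2_rating = int(crit_nums[0], 2)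
--
--     return co2_rating
-- ===== SOURCE B (Python) =====
-- def get_co2_rating(data: list) -> int:
--     # Index all strings once by prefix: cnt[p] = how many strings start with p,
--     # rep[p] = the last such string.  Then descend prefix by prefix, choosing
--     # the minority bit exactly as A does, without ever rebuilding survivor lists.
--     cnt = {}
--     rep = {}
--     for s in data:
--         for k in range(len(s) + 1):
--             p = s[:k]
--             cnt[p] = cnt.get(p, 0) + 1
--             rep[p] = s
--     p = ''
--     while cnt[p] > 1:
--         zeros = cnt.get(p + '0', 0)
--         p = p + ('1' if zeros > cnt[p] - zeros else '0')
--     return int(rep[p], 2)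
-- ===== Notes on version B (the rewrite author's own statement) =====
-- stated objective: alternative
-- what changed: B builds one dictionary indexing every string prefix with its count (and a representative string) and then descends prefix by prefix, instead of A's per-round counting and rebuilding of the survivor list.
import Mathlib
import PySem

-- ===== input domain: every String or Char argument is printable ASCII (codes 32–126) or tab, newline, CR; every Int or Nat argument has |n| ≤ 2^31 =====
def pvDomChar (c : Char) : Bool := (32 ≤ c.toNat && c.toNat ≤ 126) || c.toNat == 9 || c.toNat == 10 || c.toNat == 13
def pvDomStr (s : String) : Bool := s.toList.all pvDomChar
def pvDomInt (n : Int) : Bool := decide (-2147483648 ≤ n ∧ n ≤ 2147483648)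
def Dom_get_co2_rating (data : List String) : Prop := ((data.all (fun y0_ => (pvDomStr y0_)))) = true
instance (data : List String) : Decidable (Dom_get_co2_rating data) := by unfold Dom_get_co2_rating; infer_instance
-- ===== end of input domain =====

-- B replaces A's per-round survivor-list rebuilding by one prefix-count dictionary
-- built up front and a single descent; equivalence is proved on Pre_, the closed form
-- of A's crash-free runs.

-- ===== PORT A =====
-- int(s, 2), shared by both ports; Python-exact on the printable-ASCII domain
-- (strip whitespace, optional sign, optional 0b/0B prefix, '_' digit separators);
-- none = ValueError, excluded by Pre_
def pvIsWS (c : Char) : Bool :=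
  c == ' ' || c == '\t' || c == '\n' || c == '\r' || c == '\x0b' || c == '\x0c'

def pvDigLoop : List Char → Int → Option Int
  | [], acc => some acc
  | '_' :: c :: rest, acc =>
    if c = '0' ∨ c = '1' then pvDigLoop rest (acc * 2 + (if c = '1' then 1 else 0)) else none
  | ['_'], _ => none
  | c :: rest, acc =>
    if c = '0' ∨ c = '1' then pvDigLoop rest (acc * 2 + (if c = '1' then 1 else 0)) else none

def pvDigits2 : List Char → Option Int
  | '0' :: rest => pvDigLoop rest 0
  | '1' :: rest => pvDigLoop rest 1
  | _ => none

def pvParse2Core : List Char → Option Int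
  | '0' :: 'b' :: t => (match t with | '_' :: u => pvDigits2 u | u => pvDigits2 u)
  | '0' :: 'B' :: t => (match t with | '_' :: u => pvDigits2 u | u => pvDigits2 u)
  | l => pvDigits2 l

def pvParse2 (s : String) : Option Int :=
  match ((s.toList.dropWhile pvIsWS).reverse.dropWhile pvIsWS).reverse with
  | '+' :: t => pvParse2Core t
  | '-' :: t => (pvParse2Core t).map (fun v => -v)
  | t => pvParse2Core t

-- the while-loop of A; x[pos] is rendered as getD (always in range on Pre_),
-- and the fuel data.length covers every Pre_ run (the survivor count shrinks each round)
def pvA_loop (crit : List String) (pos : Nat) (fuel : Nat) : List String :=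
  match fuel with
  | 0 => crit
  | fuel+1 =>
    if 1 < crit.length then
      let pos_sum_0 : Int :=
        crit.foldl (fun acc x => acc + (if x.toList.getD pos ' ' = '0' then 1 else 0)) 0
      let pos_sum_1 : Int := (crit.length : Int) - pos_sum_0
      let crit' := if pos_sum_1 < pos_sum_0
        then crit.filter (fun i => i.toList.getD pos ' ' = '1')
        else crit.filter (fun i => i.toList.getD pos ' ' = '0')
      pvA_loop crit' (pos+1) fuel
    else crit

def get_co2_rating (data : List String) : Int :=
  (pvParse2 ((pvA_loop data 0 data.length).headD "")).getD 0

-- ===== PORT B =====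
-- Source B's single build loop: cnt[p] = number of strings with prefix p, rep[p] = last
-- such string (prefixes modelled as List Char, via String ↔ List Char)
def pvBuild (data : List String) :
    PySem.Dict (List Char) Int × PySem.Dict (List Char) String :=
  data.foldl (fun cr s =>
    (List.range (s.length + 1)).foldl (fun cr k =>
      (cr.1.insert (s.toList.take k) (cr.1.getD (s.toList.take k) 0 + 1),
       cr.2.insert (s.toList.take k) s)) cr)
    (PySem.Dict.empty, PySem.Dict.empty)

-- Source B's while loop; missing keys read as count 0 (Python's KeyError on cnt[p] is
-- outside Pre_); fuel = total length + 1 covers every Pre_ run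
def pvB_loop (cnt : PySem.Dict (List Char) Int) (p : List Char) (fuel : Nat) : List Char :=
  match fuel with
  | 0 => p
  | fuel+1 =>
    if 1 < cnt.getD p 0 then
      let zeros := cnt.getD (p ++ ['0']) 0
      pvB_loop cnt (p ++ [if cnt.getD p 0 - zeros < zeros then '1' else '0']) fuel
    else p

def get_co2_rating_alt (data : List String) : Int :=
  let cr := pvBuild data
  let p := pvB_loop cr.1 [] (data.foldl (fun a s => a + s.length) 0 + 1)
  (pvParse2 (cr.2.getD p "")).getD 0

-- ===== PRECONDITION & SPEC =====
-- closed-form validity of s as a Python base-2 int literal (what int(s, 2) accepts):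
-- after stripping whitespace, an optional sign and an optional 0b/0B[_] prefix, the
-- digits are nonempty, start and end with a bit, contain only bits and '_', and have
-- no two adjacent '_'
def pvIsBit (c : Char) : Bool := c == '0' || c == '1'

def pvStripPrefix : List Char → List Char
  | '0' :: 'b' :: v => (match v with | '_' :: w => w | w => w)
  | '0' :: 'B' :: v => (match v with | '_' :: w => w | w => w)
  | w => w

def pvDigitsOK (d : List Char) : Bool :=
  !d.isEmpty && pvIsBit (d.headD ' ') && d.all (fun c => pvIsBit c || c == '_') &&
  pvIsBit (d.getLastD ' ') && (d.zip d.tail).all (fun ab => !(ab.1 == '_' && ab.2 == '_'))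

def pvBinLiteral (s : String) : Bool :=
  pvDigitsOK
    (match ((s.toList.dropWhile pvIsWS).reverse.dropWhile pvIsWS).reverse with
     | '+' :: t => pvStripPrefix t
     | '-' :: t => pvStripPrefix t
     | t => pvStripPrefix t)

-- Pre_ = exactly A's crash-free runs, in closed form: some survivor s that int(_,2)
-- accepts such that every prefix-group of ≥ 2 strings is still indexable (s and every
-- group member longer than the split position) and s's next character follows A's
-- majority rule; everything excluded is an input where A raises (IndexError on a short
-- string or an emptied survivor list, or ValueError in int(_,2)).
def pvPreB (data : List String) : Bool :=
  data.any (fun s =>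
    pvBinLiteral s &&
    (List.range (s.toList.length + 1)).all (fun k =>
      !decide (2 ≤ (data.filter (fun y => y.toList.take k = s.toList.take k)).length) ||
      (decide (k < s.toList.length) &&
       data.all (fun y =>
         !decide (y.toList.take k = s.toList.take k) || decide (k < y.toList.length)) &&
       decide (s.toList.getD k ' ' =
         (if (data.filter (fun y => y.toList.take k = s.toList.take k)).length
              - (data.filter (fun y => y.toList.take (k+1) = s.toList.take k ++ ['0'])).length
              < (data.filter (fun y => y.toList.take (k+1) = s.toList.take k ++ ['0'])).length
          then '1' else '0')))))

def Pre_get_co2_rating (data : List String) : Prop := pvPreB data = true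
instance (data : List String) : Decidable (Pre_get_co2_rating data) := by
  unfold Pre_get_co2_rating; infer_instance

def pvWitness_get_co2_rating : List String := ["01", "10", "11"]

def Spec_get_co2_rating (data : List String) (out : Int) : Prop := out = get_co2_rating_alt data
instance (data : List String) (out : Int) : Decidable (Spec_get_co2_rating data out) := by
  unfold Spec_get_co2_rating; infer_instance

-- ===== CLAIM (what is proved, stated in full; the proofs are below) =====
def Claim_equal_get_co2_rating : Prop := ∀ (data : List String), Dom_get_co2_rating data → Pre_get_co2_rating data → Spec_get_co2_rating data (get_co2_rating data)

-- ===== LEMMAS AND PROOFS =====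

-- the survivor group: strings sharing s's k-prefix, and its refinement by the next char
def pvGrp (data : List String) (s : String) (k : Nat) : List String :=
  data.filter (fun y => y.toList.take k = s.toList.take k)

def pvGrpb (data : List String) (s : String) (k : Nat) (c : Char) : List String :=
  data.filter (fun y => y.toList.take (k+1) = s.toList.take k ++ [c])

-- the per-prefix clause of Pre_, restated through pvGrp/pvGrpb
def pvCond (data : List String) (s : String) : Prop :=
  ∀ k ∈ List.range (s.toList.length + 1), 2 ≤ (pvGrp data s k).length →
    k < s.toList.length ∧
    (∀ y ∈ data, y.toList.take k = s.toList.take k → k < y.toList.length) ∧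
    s.toList.getD k ' ' =
      (if (pvGrp data s k).length - (pvGrpb data s k '0').length < (pvGrpb data s k '0').length
       then '1' else '0')

lemma pvPre_elim (data : List String) (h : Pre_get_co2_rating data) :
    ∃ s ∈ data, pvCond data s := by
  unfold Pre_get_co2_rating pvPreB at h
  rw [List.any_eq_true] at h
  obtain ⟨s, hs, hrest⟩ := h
  rw [Bool.and_eq_true, List.all_eq_true] at hrest
  obtain ⟨_hps, hcond⟩ := hrest
  refine ⟨s, hs, ?_⟩
  intro k hk h2
  have hk' := hcond k hk
  rw [Bool.or_eq_true] at hk'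
  rcases hk' with habs | hgood
  · rw [Bool.not_eq_true', decide_eq_false_iff_not] at habs
    exact absurd h2 (by simpa [pvGrp] using habs)
  · simp only [Bool.and_eq_true] at hgood
    obtain ⟨⟨hlt, hall⟩, hbit⟩ := hgood
    refine ⟨of_decide_eq_true hlt, ?_, ?_⟩
    · intro y hy hpre
      have hya := List.all_eq_true.mp hall y hy
      rcases (by simpa using hya :
          ¬ (List.take k y.toList = List.take k s.toList) ∨ k < y.toList.length) with hno | hyes
      · exact absurd hpre hno
      · exact hyes
    · have := of_decide_eq_true hbit
      simpa [pvGrp, pvGrpb] using this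

-- filtering the k-prefix group by the character at k = filtering by the (k+1)-prefix
lemma pvFilterStep (l : List String) (p : List Char) (k : Nat) (c : Char)
    (hp : p.length = k)
    (hl : ∀ y ∈ l, y.toList.take k = p → k < y.toList.length) :
    (l.filter (fun y => y.toList.take k = p)).filter (fun y => y.toList.getD k ' ' = c)
      = l.filter (fun y => y.toList.take (k+1) = p ++ [c]) := by
  rw [List.filter_filter]
  apply List.filter_congr
  intro y hy
  rw [show (decide (y.toList.getD k ' ' = c) && decide (List.take k y.toList = p))
        = decide ((y.toList.getD k ' ' = c) ∧ (List.take k y.toList = p)) from by simp,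
      decide_eq_decide]
  constructor
  · rintro ⟨hch, hpre⟩
    have hk := hl y hy hpre
    have hgd : y.toList.getD k ' ' = y.toList[k] := List.getD_eq_getElem _ _ hk
    rw [List.take_add_one, hpre, List.getElem?_eq_getElem hk]
    rw [hgd] at hch
    simp [hch]
  · intro htk
    have hyl : y.toList.length = y.length := by simp
    have hk : k < y.toList.length := by
      have h := congrArg List.length htk
      simp [hp] at h
      rw [hyl]
      omega
    rw [List.take_add_one, List.getElem?_eq_getElem hk] at htk
    have hpair : List.take k y.toList = p ∧ y.toList[k] = c := by
      have hlen : (List.take k y.toList).length = p.length := by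
        simp only [List.length_take, hp]
        rw [hyl] at hk ⊢
        omega
      have htk' : List.take k y.toList ++ [y.toList[k]] = p ++ [c] := by simpa using htk
      have h := List.append_inj htk' hlen
      simpa using h
    have hgd : y.toList.getD k ' ' = y.toList[k] := List.getD_eq_getElem _ _ hk
    exact ⟨by rw [hgd, hpair.2], hpair.1⟩

-- A's comprehension-sum counts the '0' characters
lemma pvSum_aux (pos : Nat) : ∀ (crit : List String) (acc : Int),
    crit.foldl (fun acc x => acc + (if x.toList.getD pos ' ' = '0' then 1 else 0)) acc
      = acc + (crit.countP (fun x => x.toList.getD pos ' ' = '0') : Int) := by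
  intro crit
  induction crit with
  | nil => simp
  | cons y t ih =>
    intro acc
    simp only [List.foldl_cons, List.countP_cons, ih]
    by_cases h : y.toList.getD pos ' ' = '0' <;> simp [h] <;> ring

lemma pvSum_eq_countP (crit : List String) (pos : Nat) :
    crit.foldl (fun acc x => acc + (if x.toList.getD pos ' ' = '0' then 1 else 0)) (0 : Int)
      = (crit.countP (fun x => x.toList.getD pos ' ' = '0') : Int) := by
  rw [pvSum_aux]
  ring

lemma pvA_loop_succ (crit : List String) (pos fuel : Nat) (h : 1 < crit.length) :
    pvA_loop crit pos (fuel+1) =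
      pvA_loop
        (if ((crit.length : Int) -
              crit.foldl (fun acc x => acc + (if x.toList.getD pos ' ' = '0' then 1 else 0)) 0) <
            crit.foldl (fun acc x => acc + (if x.toList.getD pos ' ' = '0' then 1 else 0)) 0
          then crit.filter (fun i => i.toList.getD pos ' ' = '1')
          else crit.filter (fun i => i.toList.getD pos ' ' = '0')) (pos+1) fuel := by
  rw [pvA_loop]
  simp only [h, if_true]

lemma pvB_loop_succ (cnt : PySem.Dict (List Char) Int) (p : List Char) (fuel : Nat)
    (h : 1 < cnt.getD p 0) :
    pvB_loop cnt p (fuel+1) =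
      pvB_loop cnt
        (p ++ [if cnt.getD p 0 - cnt.getD (p ++ ['0']) 0 < cnt.getD (p ++ ['0']) 0
               then '1' else '0']) fuel := by
  rw [pvB_loop]
  simp only [h, if_true]

-- splitting Source B's single build loop into its two dictionary components
lemma pvFoldl_prod {α β γ : Type} (f : α → γ → α) (g : β → γ → β) :
    ∀ (l : List γ) (a : α) (b : β),
      l.foldl (fun cr x => (f cr.1 x, g cr.2 x)) (a, b) = (l.foldl f a, l.foldl g b) := by
  intro l
  induction l with
  | nil => intro a b; rfl
  | cons x t ih => intro a b; simp only [List.foldl_cons]; exact ih (f a x) (g b x)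

def pvCntF (c : PySem.Dict (List Char) Int) (s : String) : PySem.Dict (List Char) Int :=
  (List.range (s.length + 1)).foldl
    (fun c k => c.insert (s.toList.take k) (c.getD (s.toList.take k) 0 + 1)) c

def pvRepF (r : PySem.Dict (List Char) String) (s : String) : PySem.Dict (List Char) String :=
  (List.range (s.length + 1)).foldl (fun r k => r.insert (s.toList.take k) s) r

lemma pvBuild_aux (data : List String) :
    ∀ (cr : PySem.Dict (List Char) Int × PySem.Dict (List Char) String),
      data.foldl (fun cr s =>
        (List.range (s.length + 1)).foldl (fun cr k =>
          (cr.1.insert (s.toList.take k) (cr.1.getD (s.toList.take k) 0 + 1),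
           cr.2.insert (s.toList.take k) s)) cr) cr
        = (data.foldl pvCntF cr.1, data.foldl pvRepF cr.2) := by
  induction data with
  | nil => intro cr; rfl
  | cons s t ih =>
    intro cr
    simp only [List.foldl_cons]
    rw [show (List.range (s.length + 1)).foldl (fun cr k =>
          ((cr : PySem.Dict (List Char) Int × PySem.Dict (List Char) String).1.insert
              (s.toList.take k) (cr.1.getD (s.toList.take k) 0 + 1),
           cr.2.insert (s.toList.take k) s)) cr = (pvCntF cr.1 s, pvRepF cr.2 s) from by
      unfold pvCntF pvRepF
      rw [show cr = (cr.1, cr.2) from rfl]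
      exact pvFoldl_prod
        (fun c k => c.insert (s.toList.take k) (c.getD (s.toList.take k) 0 + 1))
        (fun r k => r.insert (s.toList.take k) s) (List.range (s.length + 1)) cr.1 cr.2]
    exact ih _

lemma pvBuild_eq (data : List String) :
    pvBuild data = (data.foldl pvCntF PySem.Dict.empty, data.foldl pvRepF PySem.Dict.empty) := by
  unfold pvBuild
  exact pvBuild_aux data _

-- for one string, how often a given prefix key occurs among its prefixes
lemma pvCount_prefixes (t : List Char) (p : List Char) :
    ((List.range (t.length + 1)).map (fun k => t.take k)).count p
      = (if t.take p.length = p then 1 else 0) := by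
  rw [List.count_eq_countP, List.countP_map]
  have hchar : ∀ k ∈ List.range (t.length + 1),
      (t.take k = p) ↔ (k = p.length ∧ t.take p.length = p) := by
    intro k hk
    rw [List.mem_range] at hk
    constructor
    · intro h
      have hlen := congrArg List.length h
      rw [List.length_take] at hlen
      have hkp : k = p.length := by omega
      exact ⟨hkp, by rw [← hkp]; exact h⟩
    · rintro ⟨rfl, h⟩; exact h
  by_cases hp : t.take p.length = p
  · have hple : p.length ≤ t.length := by
      have := congrArg List.length hp
      rw [List.length_take] at this
      omega
    rw [if_pos hp]
    rw [List.countP_congr (q := fun k => k == p.length) (by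
      intro k hk
      simp only [Function.comp_apply]
      rw [Bool.eq_iff_iff]
      simp only [beq_iff_eq]
      rw [hchar k hk]
      tauto)]
    rw [← List.count_eq_countP, List.count_range]
    simp [hple]
  · rw [if_neg hp, List.countP_eq_zero]
    intro k hk
    simp only [Function.comp_apply, beq_iff_eq]
    intro h
    exact hp ((hchar k hk).mp h).2

-- the count dictionary reads back the number of strings carrying the prefix
lemma pvCnt_getD (data : List String) :
    ∀ (c : PySem.Dict (List Char) Int) (p : List Char),
      (data.foldl pvCntF c).getD p 0
        = c.getD p 0 + (data.countP (fun y => y.toList.take p.length = p) : Int) := by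
  induction data with
  | nil => intro c p; simp
  | cons s t ih =>
    intro c p
    simp only [List.foldl_cons, List.countP_cons, ih]
    have hstep : (pvCntF c s).getD p 0
        = c.getD p 0 + (if s.toList.take p.length = p then 1 else 0 : Int) := by
      unfold pvCntF
      rw [show (List.range (s.length + 1)).foldl
            (fun c k => PySem.Dict.insert c (s.toList.take k) (c.getD (s.toList.take k) 0 + 1)) c
          = ((List.range (s.length + 1)).map (fun k => s.toList.take k)).foldl
            (fun c x => PySem.Dict.insert c x (c.getD x 0 + 1)) c from by
        rw [List.foldl_map]]
      rw [PySem.Dict.getD_foldl_insert_add_one]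
      rw [show s.length = s.toList.length from by simp]
      rw [pvCount_prefixes]
      by_cases h : s.toList.take p.length = p <;> simp [h]
    rw [hstep]
    by_cases h : s.toList.take p.length = p <;> simp [h] <;> push_cast <;> ring

-- the representative dictionary reads back the last string carrying the prefix
lemma pvRep_inner (s : String) (p : List Char) :
    ∀ (ks : List Nat) (r : PySem.Dict (List Char) String),
      (ks.foldl (fun r k => r.insert (s.toList.take k) s) r).get? p
        = if ks.any (fun k => s.toList.take k == p) then some s else r.get? p := by
  intro ks
  induction ks with
  | nil => intro r; simp
  | cons k t ih =>
    intro r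
    simp only [List.foldl_cons, List.any_cons, ih]
    by_cases ht : t.any (fun k => s.toList.take k == p)
    · simp [ht]
    · by_cases hk : s.toList.take k = p
      · simp [ht, hk, PySem.Dict.get?_insert_self]
      · have hne : p ≠ s.toList.take k := fun h => hk h.symm
        simp [ht, hk, PySem.Dict.get?_insert_of_ne r s hne]

lemma pvRep_any (s : String) (p : List Char) :
    (List.range (s.length + 1)).any (fun k => s.toList.take k == p)
      = decide (s.toList.take p.length = p) := by
  by_cases h : s.toList.take p.length = p
  · have hple : p.length ≤ s.toList.length := by
      have := congrArg List.length h
      rw [List.length_take] at this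
      omega
    rw [decide_eq_true h, List.any_eq_true]
    exact ⟨p.length, by
      rw [List.mem_range]
      rw [show s.length = s.toList.length from by simp]
      omega, by simp [h]⟩
  · rw [decide_eq_false h, List.any_eq_false]
    intro k hk
    rw [List.mem_range, show s.length = s.toList.length from by simp] at hk
    simp only [beq_iff_eq]
    intro hkp
    have hlen := congrArg List.length hkp
    rw [List.length_take] at hlen
    have hke : k = p.length := by omega
    exact h (hke ▸ hkp)

lemma pvRep_get? (data : List String) (r : PySem.Dict (List Char) String) (p : List Char) :
    (data.foldl pvRepF r).get? p
      = match (data.filter (fun y => y.toList.take p.length = p)).getLast? with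
        | some y => some y
        | none => r.get? p := by
  induction data using List.reverseRecOn generalizing r with
  | nil => simp
  | append_singleton l s ih =>
    rw [List.foldl_append]
    have hstep : ∀ (r' : PySem.Dict (List Char) String), (pvRepF r' s).get? p
        = if s.toList.take p.length = p then some s else r'.get? p := by
      intro r'
      unfold pvRepF
      rw [pvRep_inner, pvRep_any]
      by_cases h : s.toList.take p.length = p <;> simp [h]
    simp only [List.foldl_cons, List.foldl_nil]
    rw [hstep, List.filter_append]
    by_cases h : s.toList.take p.length = p
    · rw [if_pos h]
      rw [show List.filter (fun y => decide (List.take p.length y.toList = p)) [s] = [s] from by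
        simp [h]]
      rw [List.getLast?_concat]
    · rw [if_neg h]
      rw [show List.filter (fun y => decide (List.take p.length y.toList = p)) [s] = [] from by
        simp [h]]
      rw [List.append_nil, ih]

-- total length bounds any member's length (fuel for B's descent)
lemma pvFoldSum_shift (t : List String) :
    ∀ (b : Nat), t.foldl (fun a s => a + s.length) b
      = t.foldl (fun a s => a + s.length) 0 + b := by
  induction t with
  | nil => intro b; simp
  | cons y u ih =>
    intro b
    simp only [List.foldl_cons]
    rw [ih (b + y.length), ih (0 + y.length)]
    omega

lemma pvLenBound (data : List String) :
    ∀ s ∈ data, s.length ≤ data.foldl (fun a s => a + s.length) 0 := by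
  induction data with
  | nil => intro s hs; cases hs
  | cons x t ih =>
    intro s hs
    simp only [List.foldl_cons]
    rw [pvFoldSum_shift]
    rcases List.mem_cons.mp hs with rfl | hs2
    · omega
    · have := ih s hs2
      omega

-- the two loops in lockstep along s's prefixes
lemma pvLockstep (data : List String) (s : String) (cnt : PySem.Dict (List Char) Int)
    (hcnt : ∀ p : List Char, cnt.getD p 0
      = (data.countP (fun y => y.toList.take p.length = p) : Int))
    (hs : s ∈ data) (hcond : pvCond data s) :
    ∀ fuelA k fuelB, k ≤ s.toList.length → (pvGrp data s k).length ≤ fuelA →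
      s.toList.length - k < fuelB →
      pvA_loop (pvGrp data s k) k fuelA = [s] ∧
      ∃ m, pvB_loop cnt (s.toList.take k) fuelB = s.toList.take m ∧
        m ≤ s.toList.length ∧ pvGrp data s m = [s] := by
  intro fuelA
  induction fuelA with
  | zero =>
    intro k fuelB hk hfa _
    exfalso
    have : s ∈ pvGrp data s k := by
      unfold pvGrp; rw [List.mem_filter]; exact ⟨hs, by simp⟩
    have := List.length_pos_of_mem this
    omega
  | succ fuelA ih =>
    intro k fuelB hk hfa hfb
    have hsmem : s ∈ pvGrp data s k := by
      unfold pvGrp; rw [List.mem_filter]; exact ⟨hs, by simp⟩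
    have hpos : 1 ≤ (pvGrp data s k).length := List.length_pos_of_mem hsmem
    have hplen : (s.toList.take k).length = k := by
      rw [List.length_take]; omega
    have hcntp : cnt.getD (s.toList.take k) 0 = ((pvGrp data s k).length : Int) := by
      rw [hcnt, hplen]
      unfold pvGrp
      rw [List.countP_eq_length_filter]
    obtain ⟨fuelB', rfl⟩ : ∃ fb, fuelB = fb + 1 := ⟨fuelB - 1, by omega⟩
    by_cases hbig : 2 ≤ (pvGrp data s k).length
    · obtain ⟨hklen, hlenall, hbit⟩ := hcond k (by rw [List.mem_range]; omega) hbig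
      have hlenall' : ∀ y ∈ data, y.toList.take k = s.toList.take k → k < y.toList.length :=
        hlenall
      have hq0 : (pvGrp data s k).filter (fun y => y.toList.getD k ' ' = '0')
          = pvGrpb data s k '0' := by
        unfold pvGrp pvGrpb
        exact pvFilterStep data (s.toList.take k) k '0' hplen hlenall'
      have hq1 : (pvGrp data s k).filter (fun y => y.toList.getD k ' ' = '1')
          = pvGrpb data s k '1' := by
        unfold pvGrp pvGrpb
        exact pvFilterStep data (s.toList.take k) k '1' hplen hlenall'
      have hz_le : (pvGrpb data s k '0').length ≤ (pvGrp data s k).length := by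
        rw [← hq0]; exact List.length_filter_le _ _
      have hsum : (pvGrp data s k).foldl
            (fun acc x => acc + (if x.toList.getD k ' ' = '0' then 1 else 0)) (0 : Int)
          = ((pvGrpb data s k '0').length : Int) := by
        rw [pvSum_eq_countP, List.countP_eq_length_filter, hq0]
      have hcntz : cnt.getD (s.toList.take k ++ ['0']) 0
          = ((pvGrpb data s k '0').length : Int) := by
        rw [hcnt]
        rw [show (s.toList.take k ++ ['0']).length = k + 1 from by simp [hplen]]
        unfold pvGrpb
        rw [List.countP_eq_length_filter]
      have htake1 : List.take (k+1) s.toList = List.take k s.toList ++ [s.toList.getD k ' '] := by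
        have hgd : s.toList.getD k ' ' = s.toList[k] := List.getD_eq_getElem _ _ hklen
        rw [List.take_add_one, List.getElem?_eq_getElem hklen, hgd]
        simp
      have hGnext : pvGrp data s (k+1) = pvGrpb data s k (s.toList.getD k ' ') := by
        unfold pvGrp pvGrpb
        apply List.filter_congr
        intro y hy
        rw [htake1]
      -- the surviving branch is strictly smaller
      have hshrink : (pvGrp data s (k+1)).length < (pvGrp data s k).length := by
        rw [hGnext]
        by_cases hc : (pvGrp data s k).length - (pvGrpb data s k '0').length
            < (pvGrpb data s k '0').length
        · rw [hbit, if_pos hc] at *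
          have h1le : (pvGrpb data s k '1').length ≤ (pvGrp data s k).length := by
            rw [← hq1]; exact List.length_filter_le _ _
          rcases Nat.lt_or_ge (pvGrpb data s k '1').length (pvGrp data s k).length with h | h
          · rw [hbit]; exact h
          · exfalso
            have heq : (pvGrpb data s k '1').length = (pvGrp data s k).length := by omega
            rw [← hq1] at heq
            have hall := (List.length_filter_eq_length_iff).mp heq
            have : (pvGrp data s k).filter (fun y => y.toList.getD k ' ' = '0') = [] := by
              rw [List.filter_eq_nil_iff]
              intro y hy hdy
              have h1 := hall y hy
              rw [of_decide_eq_true h1] at hdy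
              exact absurd (of_decide_eq_true hdy) (by decide)
            rw [hq0] at this
            rw [this] at hc
            simp at hc
        · rw [hbit, if_neg hc] at *
          rcases Nat.lt_or_ge (pvGrpb data s k '0').length (pvGrp data s k).length with h | h
          · rw [hbit]; exact h
          · exfalso
            have heq : (pvGrpb data s k '0').length = (pvGrp data s k).length := by omega
            rw [heq] at hc
            omega
      -- A's round
      have hA : pvA_loop (pvGrp data s k) k (fuelA + 1)
          = pvA_loop (pvGrp data s (k+1)) (k+1) fuelA := by
        rw [pvA_loop_succ _ _ _ (by omega), hsum]
        congr 1
        by_cases hc : (pvGrp data s k).length - (pvGrpb data s k '0').length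
            < (pvGrpb data s k '0').length
        · rw [if_pos (by omega), hq1, hGnext, hbit, if_pos hc]
        · rw [if_neg (by omega), hq0, hGnext, hbit, if_neg hc]
      -- B's round
      have hB : pvB_loop cnt (s.toList.take k) (fuelB' + 1)
          = pvB_loop cnt (s.toList.take (k+1)) fuelB' := by
        rw [pvB_loop_succ cnt _ _ (by rw [hcntp]; omega)]
        congr 1
        rw [hcntp, hcntz, htake1, hbit]
        by_cases hc : (pvGrp data s k).length - (pvGrpb data s k '0').length
            < (pvGrpb data s k '0').length
        · rw [if_pos (by omega), if_pos hc]
        · rw [if_neg (by omega), if_neg hc]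
      rw [hA, hB]
      exact ih (k+1) fuelB' hklen (by omega) (by omega)
    · -- exit: the group is the singleton [s]
      have h1 : (pvGrp data s k).length = 1 := by omega
      have hGs : pvGrp data s k = [s] := by
        obtain ⟨a, ha⟩ := List.length_eq_one_iff.mp h1
        rw [ha] at hsmem ⊢
        rw [List.mem_singleton.mp hsmem]
      refine ⟨?_, k, ?_, hk, hGs⟩
      · rw [pvA_loop]
        simp [hGs]
      · rw [pvB_loop]
        rw [hcntp, h1]
        simp

-- ===== VERDICT (by name: the statement is the Claim_ definition above) =====
theorem get_co2_rating_spec : Claim_equal_get_co2_rating := by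
  intro data _hdom hpre
  obtain ⟨s, hs, hcond⟩ := pvPre_elim data hpre
  show get_co2_rating data = get_co2_rating_alt data
  unfold get_co2_rating get_co2_rating_alt
  show (pvParse2 ((pvA_loop data 0 data.length).headD "")).getD 0
      = (pvParse2 (((pvBuild data).2).getD
          (pvB_loop (pvBuild data).1 [] (data.foldl (fun a s => a + s.length) 0 + 1)) "")).getD 0
  rw [pvBuild_eq]
  have hcnt : ∀ p : List Char, (data.foldl pvCntF PySem.Dict.empty).getD p 0
      = (data.countP (fun y => y.toList.take p.length = p) : Int) := by
    intro p
    rw [pvCnt_getD]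
    simp
  have h0 : pvGrp data s 0 = data := by
    unfold pvGrp
    apply List.filter_eq_self.mpr
    intro y hy
    simp
  have hfb : s.toList.length - 0 < data.foldl (fun a s => a + s.length) 0 + 1 := by
    have := pvLenBound data s hs
    rw [show s.toList.length = s.length from by simp]
    omega
  obtain ⟨hA, m, hB, hm, hGm⟩ := pvLockstep data s _ hcnt hs hcond
    data.length 0 (data.foldl (fun a s => a + s.length) 0 + 1)
    (Nat.zero_le _) (by rw [h0]) hfb
  rw [h0] at hA
  simp only [List.take_zero] at hB
  rw [hA, hB]
  have hrep : (data.foldl pvRepF PySem.Dict.empty).getD (s.toList.take m) "" = s := by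
    have hml : (s.toList.take m).length = m := by rw [List.length_take]; omega
    have hfilt : data.filter (fun y => y.toList.take (s.toList.take m).length = s.toList.take m)
        = [s] := by
      rw [hml]; exact hGm
    rw [PySem.Dict.getD_eq_get?_getD, pvRep_get?, hfilt]
    simp
  rw [hrep]
  simp
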